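-- pv_equiv track=rewrite | github.com/Gargonslipfisk/Mancala | src/board_position_notation.py | r_str2list
-- ===== SOURCE A (Python) =====
-- from typing import Dict, List
-- from enum import Enum
--
-- class Decenas(Enum):
--     """
--
--     """
--     D = '1'
--     V = '2'
--
-- def r_str2list(subfen:str) -> List:
--     """
--
--     :param subfen:
--     :return:
--     """
--     restricted = ['D', 'V']
--     listo = []
--     while subfen:
--         head, *tail = subfen
--         if head in restricted:
--             body, *tail = tail
--             listo.append(Decenas[head].value + body)
--         else:
--             listo.append(head)
--         subfen = tail
--     return listo
-- ===== SOURCE B (Python) =====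
-- def r_str2list(subfen: str):
--     # single index-based forward pass; no tail-list copies
--     m = {'D': '1', 'V': '2'}
--     out = []
--     i = 0
--     n = len(subfen)
--     while i < n:
--         c = subfen[i]
--         if c in m:
--             out.append(m[c] + subfen[i + 1])
--             i += 2
--         else:
--             out.append(c)
--             i += 1
--     return out
-- ===== Notes on version B (the rewrite author's own statement) =====
-- stated objective: faster
-- what changed: replaced the per-iteration unpacking that copies the remaining tail list with a single index-based forward pass over the string
import Mathlib
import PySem

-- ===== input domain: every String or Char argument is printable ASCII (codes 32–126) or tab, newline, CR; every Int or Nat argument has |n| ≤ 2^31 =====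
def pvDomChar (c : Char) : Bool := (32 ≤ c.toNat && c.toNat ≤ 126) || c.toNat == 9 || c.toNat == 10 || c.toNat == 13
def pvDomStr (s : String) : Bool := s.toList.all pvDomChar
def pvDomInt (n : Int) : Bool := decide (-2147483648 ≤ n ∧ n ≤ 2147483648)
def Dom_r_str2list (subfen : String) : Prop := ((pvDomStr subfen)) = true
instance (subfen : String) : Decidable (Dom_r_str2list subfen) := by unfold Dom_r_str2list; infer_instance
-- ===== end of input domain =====

-- B replaces A's per-step `head, *tail` tail-copying loop with a single index-based forward pass (objective: faster).


-- ===== PORT A =====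
-- Decenas[head].value : 'D' ↦ "1", 'V' ↦ "2"
def pvDecenas (c : Char) : String := if c = 'D' then "1" else "2"

-- the while loop of A: split off the head; for restricted heads also split off the body;
-- the empty-tail case of that second unpacking is where Python raises ValueError (outside Pre_)
def pvGoA : List Char → List String → List String
  | [], listo => listo
  | head :: tail, listo =>
    if head = 'D' ∨ head = 'V' then
      match tail with
      | [] => listo                 -- Python: ValueError (excluded by Pre_)
      | body :: tail2 => pvGoA tail2 (listo ++ [pvDecenas head ++ String.ofList [body]])
    else pvGoA tail (listo ++ [String.ofList [head]])

def r_str2list (subfen : String) : List String := pvGoA subfen.toList []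

-- ===== PORT B =====
-- m[c] for the dict {'D': '1', 'V': '2'}
def pvMapDV (c : Char) : String := if c = 'D' then "1" else "2"

-- B's while loop: index i walks forward, consuming 2 chars after a D/V
def pvGoB (cs : List Char) (i : Nat) (out : List String) : List String :=
  if h : i < cs.length then
    let c := cs[i]
    if c = 'D' ∨ c = 'V' then
      match cs[i+1]? with
      | some b => pvGoB cs (i + 2) (out ++ [pvMapDV c ++ String.ofList [b]])
      | none => out                 -- Python: IndexError (excluded by Pre_)
    else pvGoB cs (i + 1) (out ++ [String.ofList [c]])
  else out
termination_by cs.length - i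

def r_str2list_alt (subfen : String) : List String := pvGoB subfen.toList 0 []

-- ===== PRECONDITION & SPEC =====
-- Pre_ excludes exactly the inputs on which Python A raises ValueError (a restricted character
-- reached with nothing after it); these are exactly the strings whose maximal trailing run of
-- restricted characters has odd length.  Python B raises IndexError on the same inputs.
def Pre_r_str2list (subfen : String) : Prop :=
  (subfen.toList.reverse.takeWhile (fun c => c = 'D' ∨ c = 'V')).length % 2 = 0
instance (subfen : String) : Decidable (Pre_r_str2list subfen) := by unfold Pre_r_str2list; infer_instance

def pvWitness_r_str2list : String := "aDbVc3"

def Spec_r_str2list (subfen : String) (out : List String) : Prop := out = r_str2list_alt subfen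
instance (subfen : String) (out : List String) : Decidable (Spec_r_str2list subfen out) := by unfold Spec_r_str2list; infer_instance

-- ===== CLAIM (what is proved, stated in full; the proofs are below) =====
def Claim_equal_r_str2list : Prop := ∀ (subfen : String), Dom_r_str2list subfen → Pre_r_str2list subfen → Spec_r_str2list subfen (r_str2list subfen)

-- ===== LEMMAS AND PROOFS =====

-- B at index i, over the unconsumed suffix, computes exactly A's loop on that suffix
theorem pvGoB_eq_goA (cs : List Char) (i : Nat) (out : List String) :
    pvGoB cs i out = pvGoA (cs.drop i) out := by
  induction hn : cs.length - i using Nat.strong_induction_on generalizing i out with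
  | _ n ih =>
    subst hn
    rw [pvGoB]
    by_cases h : i < cs.length
    · simp only [dif_pos h]
      have hdrop : cs.drop i = cs[i] :: cs.drop (i + 1) := List.drop_eq_getElem_cons h
      by_cases hc : cs[i] = 'D' ∨ cs[i] = 'V'
      · simp only [if_pos hc]
        cases h2 : cs[i+1]? with
        | none =>
          have hge := List.getElem?_eq_none_iff.mp h2
          have hdrop1 : cs.drop (i+1) = [] := List.drop_eq_nil_of_le hge
          rw [hdrop, hdrop1]
          simp [pvGoA, hc]
        | some b =>
          obtain ⟨hlt, hb⟩ := List.getElem?_eq_some_iff.mp h2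
          have hdrop1 : cs.drop (i+1) = b :: cs.drop (i+2) := by
            rw [List.drop_eq_getElem_cons hlt, hb]
          rw [hdrop, hdrop1]
          simp only [pvGoA, if_pos hc]
          exact ih (cs.length - (i+2)) (by omega) (i+2) _ rfl
      · simp only [if_neg hc]
        rw [hdrop, pvGoA.eq_def]
        simp only [if_neg hc]
        exact ih (cs.length - (i+1)) (by omega) (i+1) _ rfl
    · simp only [dif_neg h]
      rw [List.drop_eq_nil_of_le (by omega), pvGoA]

-- ===== VERDICT (by name: the statement is the Claim_ definition above) =====
theorem r_str2list_spec : Claim_equal_r_str2list := by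
  intro subfen _ _
  unfold Spec_r_str2list r_str2list r_str2list_alt
  rw [pvGoB_eq_goA, List.drop_zero]
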